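-- pv_equiv track=rewrite | github.com/OmRanAlot/AmazonScraper | backend/name_parser.py | find_cpu
-- ===== SOURCE A (Python) =====
-- break_char = [":","|", ",", "•"]
--
-- CPU = ["core", "m4", "m3", "m2", "m1", "i3", "i5", "i7","i9","intel", "amd", "cpu", "ryzen", "processor"]
--
-- def find_cpu(word):
--     temp = word.lower()
--
--     index = -1
--     for keyword in CPU:
--         current_index = temp.find(keyword)
--         if (index == -1 and current_index != -1) or (current_index != -1 and current_index < index):
--             index = current_index
--
--     if index > -1:
--         # Move backward to find the start of the phrase (e.g., "8-Cores Intel Core i3")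
--         start = index
--         while start > 0 and temp[start - 1] not in break_char:
--             start -= 1
--
--         # Move forward to find the end of the phrase
--         end = index + 1
--         while end < len(temp) and temp[end] not in break_char:
--             end += 1
--
--         return word[start:end].strip()
--
--     return None
-- ===== SOURCE B (Python) =====
-- break_char = [":", "|", ",", "•"]
--
-- CPU = ["core", "m4", "m3", "m2", "m1", "i3", "i5", "i7", "i9", "intel", "amd", "cpu", "ryzen", "processor"]
--
--
-- def find_cpu(word):
--     temp = word.lower()
--     hits = [i for i in (temp.find(k) for k in CPU) if i != -1]
--     if not hits:
--         return None
--     index = min(hits)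
--     positions = [i for i, ch in enumerate(temp) if ch in break_char]
--     start = max((p + 1 for p in positions if p < index), default=0)
--     end = min((p for p in positions if p > index), default=len(temp))
--     return word[start:end].strip()
-- ===== Notes on version B (the rewrite author's own statement) =====
-- stated objective: alternative
-- what changed: A finds the phrase boundaries with two character-by-character while-loops walking out from the keyword; B instead precomputes the list of delimiter positions in one enumerate+filter pass and reads the boundaries off as max(positions below index)+1 and min(positions above index), and replaces A's running-minimum keyword loop by filter-then-min.
import Mathlib
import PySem

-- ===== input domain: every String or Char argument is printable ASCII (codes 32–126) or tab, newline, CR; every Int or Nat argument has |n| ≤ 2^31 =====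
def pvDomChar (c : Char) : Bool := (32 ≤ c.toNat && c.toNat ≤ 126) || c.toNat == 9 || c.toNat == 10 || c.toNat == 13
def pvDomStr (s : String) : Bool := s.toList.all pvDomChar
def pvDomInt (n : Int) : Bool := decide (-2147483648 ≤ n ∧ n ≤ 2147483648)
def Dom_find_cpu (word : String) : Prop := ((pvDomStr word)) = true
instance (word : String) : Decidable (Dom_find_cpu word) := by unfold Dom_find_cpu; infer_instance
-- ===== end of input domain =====

-- B replaces A's two character-by-character boundary while-loops by one precomputed list of
-- delimiter positions (enumerate+filter) queried with max/min; same return value (alternative decomposition).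


-- ===== PORT A =====
def pvBreak : List Char := [':', '|', ',', '•']

def pvCPU : List (List Char) :=
  ["core".toList, "m4".toList, "m3".toList, "m2".toList, "m1".toList, "i3".toList, "i5".toList,
   "i7".toList, "i9".toList, "intel".toList, "amd".toList, "cpu".toList, "ryzen".toList,
   "processor".toList]

-- one step of A's keyword loop
def pvStep (index ci : Int) : Int :=
  if (index = -1 ∧ ci ≠ -1) ∨ (ci ≠ -1 ∧ ci < index) then ci else index

-- A's backward while-loop: 'while start > 0 and temp[start-1] not in break_char: start -= 1'
def pvScanBack (temp : List Char) : Nat → Nat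
  | 0 => 0
  | s + 1 => if temp.getD s ' ' ∈ pvBreak then s + 1 else pvScanBack temp s

-- A's forward while-loop: 'while end < len(temp) and temp[end] not in break_char: end += 1'
def pvScanFwd (temp : List Char) (e : Nat) : Nat :=
  if h : e < temp.length then
    if temp.getD e ' ' ∈ pvBreak then e else pvScanFwd temp (e + 1)
  else e
termination_by temp.length - e

def find_cpu (word : String) : Option String :=
  let temp := PySem.Chars.lower word.toList
  let index := pvCPU.foldl (fun index kw => pvStep index (PySem.Chars.find temp kw)) (-1)
  if -1 < index then
    let start := pvScanBack temp index.toNat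
    let stop := pvScanFwd temp (index.toNat + 1)
    some (PySem.Str.strip (PySem.Str.slice word (some (start : Int)) (some (stop : Int))))
  else none

-- ===== PORT B =====
def find_cpu_alt (word : String) : Option String :=
  let temp := PySem.Chars.lower word.toList
  let hits := (pvCPU.map (fun k => PySem.Chars.find temp k)).filter (fun i => decide (i ≠ -1))
  if hits.isEmpty then none
  else
    let index := (PySem.List.min? hits (fun i => i)).getD 0
    let positions := ((PySem.List.enumerate temp 0).filter
        (fun p => decide (p.2 ∈ pvBreak))).map (fun p => p.1)
    let start := PySem.List.maxD ((positions.filter (fun p => decide (p < index))).map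
        (fun p => p + 1)) (fun x => x) 0
    let stop := PySem.List.minD (positions.filter (fun p => decide (index < p)))
        (fun x => x) (temp.length : Int)
    some (PySem.Str.strip (PySem.Str.slice word (some start) (some stop)))

-- ===== PRECONDITION & SPEC =====
def Spec_find_cpu (word : String) (out : Option String) : Prop := out = find_cpu_alt word
instance (word : String) (out : Option String) : Decidable (Spec_find_cpu word out) := by unfold Spec_find_cpu; infer_instance

-- ===== CLAIM (what is proved, stated in full; the proofs are below) =====
def Claim_equal_find_cpu : Prop := ∀ (word : String), Dom_find_cpu word → Spec_find_cpu word (find_cpu word)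

-- ===== LEMMAS AND PROOFS =====

-- positions of pvBreak characters in l, indexed from s
def posAux : List Char → Int → List Int
  | [], _ => []
  | x :: t, s => if x ∈ pvBreak then s :: posAux t (s + 1) else posAux t (s + 1)

theorem posAux_append (l r : List Char) (s : Int) :
    posAux (l ++ r) s = posAux l s ++ posAux r (s + l.length) := by
  induction l generalizing s with
  | nil => simp [posAux]
  | cons x t ih =>
    have harg : s + 1 + (t.length : Int) = s + ((t.length : Int) + 1) := by ring
    by_cases hx : x ∈ pvBreak <;> simp [posAux, hx, ih, harg]

theorem mem_posAux {l : List Char} {s x : Int} (h : x ∈ posAux l s) :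
    s ≤ x ∧ x < s + l.length := by
  induction l generalizing s with
  | nil => simp [posAux] at h
  | cons c t ih =>
    simp only [posAux] at h
    split at h
    · rcases List.mem_cons.mp h with rfl | h
      · simp only [List.length_cons]; push_cast; omega
      · have := ih h; simp only [List.length_cons] at *; push_cast at *; omega
    · have := ih h; simp only [List.length_cons] at *; push_cast at *; omega

theorem positions_eq (l : List Char) (s : Int) :
    ((PySem.List.enumerate l s).filter (fun p => decide (p.2 ∈ pvBreak))).map
      (fun p => p.1) = posAux l s := by
  induction l generalizing s with
  | nil => simp [PySem.List.enumerate_nil, posAux]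
  | cons x t ih =>
    simp only [PySem.List.enumerate_cons, List.filter_cons, posAux]
    by_cases hx : x ∈ pvBreak <;> simp [hx, ih]

theorem filter_posAux_lt (temp : List Char) (k : Nat) (hk : k ≤ temp.length) :
    (posAux temp 0).filter (fun p => decide (p < (k : Int))) = posAux (temp.take k) 0 := by
  conv_lhs => rw [← List.take_append_drop k temp, posAux_append]
  rw [List.filter_append]
  have h1 : (posAux (temp.take k) 0).filter (fun p => decide (p < (k : Int))) =
      posAux (temp.take k) 0 := by
    apply List.filter_eq_self.mpr
    intro x hx
    have := mem_posAux hx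
    simp only [List.length_take] at this
    simp; omega
  have h2 : (posAux (temp.drop k) (0 + (temp.take k).length)).filter
      (fun p => decide (p < (k : Int))) = [] := by
    apply List.filter_eq_nil_iff.mpr
    intro x hx
    have := mem_posAux hx
    simp only [List.length_take] at this
    simp; omega
  rw [h1, h2, List.append_nil]

theorem filter_posAux_gt (temp : List Char) (i : Nat) (hi : i < temp.length) :
    (posAux temp 0).filter (fun p => decide ((i : Int) < p)) =
      posAux (temp.drop (i + 1)) ((i : Int) + 1) := by
  conv_lhs => rw [← List.take_append_drop (i + 1) temp, posAux_append]
  rw [List.filter_append]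
  have h1 : (posAux (temp.take (i + 1)) 0).filter (fun p => decide ((i : Int) < p)) = [] := by
    apply List.filter_eq_nil_iff.mpr
    intro x hx
    have := mem_posAux hx
    simp only [List.length_take] at this
    simp; omega
  have h2 : (posAux (temp.drop (i + 1)) (0 + (temp.take (i + 1)).length)).filter
      (fun p => decide ((i : Int) < p)) = posAux (temp.drop (i + 1)) ((i : Int) + 1) := by
    have hl : ((temp.take (i + 1)).length : Int) = (i : Int) + 1 := by
      simp [List.length_take]; omega
    rw [List.filter_eq_self.mpr, zero_add, hl]
    intro x hx
    rw [zero_add, hl] at hx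
    have := mem_posAux hx
    simp; omega
  rw [h1, h2, List.nil_append]

theorem foldl_max_le {xs : List Int} {d b : Int} (hd : d ≤ b) (h : ∀ x ∈ xs, x ≤ b) :
    xs.foldl max d ≤ b := by
  induction xs generalizing d with
  | nil => simpa
  | cons x t ih =>
    simp only [List.foldl_cons]
    exact ih (max_le hd (h x (by simp))) (fun y hy => h y (by simp [hy]))

theorem foldl_min_eq_of_le {xs : List Int} {d : Int} (h : ∀ x ∈ xs, d ≤ x) :
    xs.foldl min d = d := by
  induction xs with
  | nil => rfl
  | cons x t ih =>
    simp only [List.foldl_cons, min_eq_left (h x (by simp))]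
    exact ih (fun y hy => h y (by simp [hy]))

theorem maxD_id_eq_foldl (xs : List Int) (d : Int) (h : ∀ x ∈ xs, d ≤ x) :
    PySem.List.maxD xs (fun x => x) d = xs.foldl max d := by
  cases xs with
  | nil => simp [PySem.List.maxD_nil]
  | cons x t =>
    rw [PySem.List.maxD_id_cons, List.foldl_cons, max_eq_right (h x (by simp))]

theorem minD_id_eq_foldl (xs : List Int) (d : Int) (h : ∀ x ∈ xs, x ≤ d) :
    PySem.List.minD xs (fun x => x) d = xs.foldl min d := by
  cases xs with
  | nil => simp [PySem.List.minD_nil]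
  | cons x t =>
    rw [PySem.List.minD_id_cons, List.foldl_cons, min_eq_right (h x (by simp))]

-- A's backward scan equals the max of the (+1-shifted) delimiter positions below k
theorem scanBack_eq (temp : List Char) (k : Nat) (hk : k ≤ temp.length) :
    ((pvScanBack temp k : Nat) : Int) =
      ((posAux (temp.take k) 0).map (fun p => p + 1)).foldl max 0 := by
  induction k with
  | zero => simp [pvScanBack, posAux]
  | succ k ih =>
    have hk' : k < temp.length := by omega
    have htake : temp.take (k + 1) = temp.take k ++ [temp[k]] := by
      rw [List.take_succ]
      simp [List.getElem?_eq_getElem hk']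
    have hgetD : temp.getD k ' ' = temp[k] := by
      simp [List.getD_eq_getElem?_getD, List.getElem?_eq_getElem hk']
    rw [pvScanBack, htake, posAux_append, hgetD]
    by_cases hb : temp[k] ∈ pvBreak
    · rw [if_pos hb]
      have hlen : ((temp.take k).length : Int) = (k : Int) := by
        simp only [List.length_take]; omega
      have hsingle : posAux [temp[k]] (0 + ((temp.take k).length : Int)) =
          [0 + ((temp.take k).length : Int)] := by simp [posAux, hb]
      rw [hsingle, List.map_append, List.foldl_append]
      have hall : ∀ x ∈ (posAux (temp.take k) 0).map (fun p => p + 1),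
          x ≤ (k : Int) + 1 := by
        intro x hx
        rcases List.mem_map.mp hx with ⟨p, hp, rfl⟩
        have := mem_posAux hp
        simp only [List.length_take] at this
        omega
      have hle := foldl_max_le (by positivity) hall
      simp only [List.map_cons, List.map_nil, List.foldl_cons, List.foldl_nil, zero_add, hlen]
      rw [max_eq_right hle]
      push_cast; ring
    · have hnil : posAux [temp[k]] (0 + ((temp.take k).length : Int)) = [] := by
        simp [posAux, hb]
      rw [if_neg hb, hnil, List.append_nil]
      exact ih (by omega)

-- A's forward scan equals the min (default len) of the delimiter positions from e on
theorem scanFwd_eq (temp : List Char) (e : Nat) (he : e ≤ temp.length) :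
    ((pvScanFwd temp e : Nat) : Int) =
      (posAux (temp.drop e) (e : Int)).foldl min (temp.length : Int) := by
  generalize hfuel : temp.length - e = fuel
  induction fuel generalizing e with
  | zero =>
    have : e = temp.length := by omega
    subst this
    rw [pvScanFwd, dif_neg (lt_irrefl _)]
    simp [List.drop_length, posAux]
  | succ fuel ih =>
    have he' : e < temp.length := by omega
    have hdrop : temp.drop e = temp[e] :: temp.drop (e + 1) :=
      List.drop_eq_getElem_cons he'
    have hgetD : temp.getD e ' ' = temp[e] := by
      simp [List.getD_eq_getElem?_getD, List.getElem?_eq_getElem he']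
    rw [pvScanFwd, dif_pos he', hgetD, hdrop]
    by_cases hb : temp[e] ∈ pvBreak
    · simp only [hb, if_pos, posAux, List.foldl_cons]
      rw [min_eq_right (by exact_mod_cast Nat.cast_le.mpr (le_of_lt he'))]
      symm
      apply foldl_min_eq_of_le
      intro x hx
      have := mem_posAux hx
      omega
    · simp only [posAux, hb, if_false]
      have := ih (e + 1) (by omega) (by omega)
      push_cast at this
      rw [← this]

-- one step of min? 's fold, with identity key
def pvMinStep (acc : Option Int) (x : Int) : Option Int :=
  match acc with
  | none => some x
  | some m => if x < m then some x else some m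

-- A's running-minimum loop against B's filter-then-min
theorem idx_loop (xs : List Int) (hge : ∀ x ∈ xs, -1 ≤ x) (acc : Int) (hacc : -1 ≤ acc) :
    (xs.filter (fun i => decide (i ≠ -1))).foldl pvMinStep
        (if acc = -1 then none else some acc)
      = (if xs.foldl pvStep acc = -1 then none else some (xs.foldl pvStep acc)) := by
  induction xs generalizing acc with
  | nil => simp
  | cons x t ih =>
    have hx : -1 ≤ x := hge x (by simp)
    have hget : ∀ y ∈ t, -1 ≤ y := fun y hy => hge y (by simp [hy])
    by_cases hxe : x = -1
    · subst hxe
      have hstep : pvStep acc (-1) = acc := by simp [pvStep]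
      rw [List.filter_cons_of_neg (by simp), List.foldl_cons, hstep]
      exact ih hget acc hacc
    · have hx0 : 0 ≤ x := by omega
      rw [List.filter_cons_of_pos (by simp [hxe]), List.foldl_cons, List.foldl_cons]
      by_cases ha : acc = -1
      · subst ha
        rw [if_pos rfl]
        have hstep : pvStep (-1) x = x := by simp [pvStep, hxe]
        rw [hstep]
        show (List.filter _ t).foldl pvMinStep (some x) = _
        have := ih hget x hx
        rw [if_neg (by omega)] at this
        exact this
      · have ha0 : 0 ≤ acc := by omega
        rw [if_neg ha]
        show (List.filter _ t).foldl pvMinStep (pvMinStep (some acc) x) = _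
        have hstep : pvStep acc x = if x < acc then x else acc := by
          simp only [pvStep, ha]
          split_ifs with h1 h2 h2 <;> tauto
        have hmstep : pvMinStep (some acc) x = if x < acc then some x else some acc := rfl
        by_cases hlt : x < acc
        · rw [hstep, if_pos hlt, hmstep, if_pos hlt]
          have := ih hget x hx
          rw [if_neg (by omega)] at this
          exact this
        · rw [hstep, if_neg hlt, hmstep, if_neg hlt]
          have := ih hget acc hacc
          rw [if_neg ha] at this
          exact this

theorem foldl_pvStep_ge (xs : List Int) (acc : Int) (hge : ∀ x ∈ xs, -1 ≤ x)
    (hacc : -1 ≤ acc) : -1 ≤ xs.foldl pvStep acc := by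
  induction xs generalizing acc with
  | nil => simpa
  | cons x t ih =>
    rw [List.foldl_cons]
    have hs : -1 ≤ pvStep acc x := by
      unfold pvStep
      split
      · exact hge x (by simp)
      · exact hacc
    exact ih (pvStep acc x) (fun y hy => hge y (by simp [hy])) hs

theorem pvCPU_ne_nil : ∀ kw ∈ pvCPU, kw ≠ [] := by decide

theorem min?_id_eq_foldl (xs : List Int) :
    PySem.List.min? xs (fun i => i) = xs.foldl pvMinStep none := by
  unfold PySem.List.min?
  congr 1
  funext acc x
  cases acc <;> rfl

-- ===== VERDICT (by name: the statement is the Claim_ definition above) =====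
theorem find_cpu_spec : Claim_equal_find_cpu := by
  intro word _
  unfold Spec_find_cpu
  simp only [find_cpu, find_cpu_alt]
  set temp := PySem.Chars.lower word.toList with htemp
  set finds := pvCPU.map (fun k => PySem.Chars.find temp k) with hfinds
  have hge : ∀ x ∈ finds, -1 ≤ x := by
    intro x hx
    rcases List.mem_map.mp hx with ⟨kw, _, rfl⟩
    exact PySem.Chars.neg_one_le_find temp kw
  have hfold : pvCPU.foldl (fun index kw => pvStep index (PySem.Chars.find temp kw)) (-1)
      = finds.foldl pvStep (-1) := by
    rw [hfinds, List.foldl_map]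
  rw [hfold]
  set A := finds.foldl pvStep (-1) with hA
  have hAge : -1 ≤ A := foldl_pvStep_ge finds (-1) hge (le_refl _)
  set hits := finds.filter (fun i => decide (i ≠ -1)) with hhits
  have hmin := idx_loop finds hge (-1) (le_refl _)
  rw [if_pos rfl, ← min?_id_eq_foldl, ← hhits, ← hA] at hmin
  by_cases hA1 : A = -1
  · -- no keyword found: both return none
    rw [hA1, if_pos rfl] at hmin
    have hempty : hits.isEmpty := by
      rw [List.isEmpty_iff]
      exact (PySem.List.min?_eq_none_iff hits _).mp hmin
    rw [if_neg (by omega), if_pos hempty]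
  · -- keyword found at index A
    rw [if_neg hA1] at hmin
    have hne : ¬ hits.isEmpty := by
      rw [List.isEmpty_iff]
      intro h
      rw [h] at hmin
      simp [PySem.List.min?] at hmin
    have hmem : A ∈ hits := PySem.List.min?_mem hmin
    have hmemf : A ∈ finds := List.mem_of_mem_filter hmem
    have hA0 : 0 ≤ A := by omega
    have hAn : A.toNat < temp.length := by
      rcases List.mem_map.mp hmemf with ⟨kw, hkw, hfk⟩
      have hspec := (PySem.Chars.find_spec (s := temp) (sub := kw) (by rw [hfk]; exact hA0)).1
      rw [← hfk]
      by_contra hcon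
      have hdrop : temp.drop (PySem.Chars.find temp kw).toNat = [] :=
        List.drop_eq_nil_of_le (by omega)
      rw [hdrop, List.prefix_nil] at hspec
      exact pvCPU_ne_nil kw hkw hspec
    rw [if_pos (by omega), if_neg hne]
    have hidx : (PySem.List.min? hits (fun i => i)).getD 0 = A := by rw [hmin]; rfl
    rw [hidx, positions_eq temp 0]
    have hkle : A.toNat ≤ temp.length := le_of_lt hAn
    have hcastA : ((A.toNat : Nat) : Int) = A := Int.toNat_of_nonneg hA0
    have hstart : PySem.List.maxD (((posAux temp 0).filter (fun p => decide (p < A))).map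
        (fun p => p + 1)) (fun x => x) 0 = ((pvScanBack temp A.toNat : Nat) : Int) := by
      have hfl : (posAux temp 0).filter (fun p => decide (p < A)) =
          posAux (temp.take A.toNat) 0 := by
        rw [← hcastA]
        exact filter_posAux_lt temp A.toNat hkle
      rw [hfl, maxD_id_eq_foldl, scanBack_eq temp A.toNat hkle]
      intro x hx
      rcases List.mem_map.mp hx with ⟨p, hp, rfl⟩
      have := mem_posAux hp
      omega
    have hstop : PySem.List.minD ((posAux temp 0).filter (fun p => decide (A < p)))
        (fun x => x) (temp.length : Int) = ((pvScanFwd temp (A.toNat + 1) : Nat) : Int) := by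
      have hfg : (posAux temp 0).filter (fun p => decide (A < p)) =
          posAux (temp.drop (A.toNat + 1)) ((A.toNat : Int) + 1) := by
        rw [← hcastA]
        exact filter_posAux_gt temp A.toNat hAn
      rw [hfg, minD_id_eq_foldl, scanFwd_eq temp (A.toNat + 1) (by omega)]
      · push_cast; ring_nf
      · intro x hx
        have := mem_posAux hx
        simp only [List.length_drop] at this
        push_cast at this
        omega
    rw [hstart, hstop]
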